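/- GENERATED by mk_final_copies.py from the proof of the farm's unit `start_decoder.R12a` (farm:start_decoder.R12a.1: Lemmas.lean) as the
   re-elaboration sweep compiled it — do not edit. -/
import Asan.CheckWalk
import Vorbis.Spec.Reader
import Vorbis.Spec.Units.start_decoder_R12a

open X86 X86.User Asan Vorbis Vorbis.Spec Vorbis.Spec.StartDecoder

set_option maxRecDepth 4000
set_option maxHeartbeats 4000000

namespace Vorbis.Spec.start_decoder_R12a

/-- The signed value of the loop counter in r13d (`j ≤ 16`), as the walker's branch hypothesis spells it. -/
theorem cnt_toInt_small (k : Nat) (h : k ≤ 16) : (Word.part Width.w32 (addr k)).toInt = (k : Int) := by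
  rw [part32_toInt, toNat_addr _ (by omega)]
  unfold sint32
  have e : k % 2 ^ 32 = k := Nat.mod_eq_of_lt (by omega)
  rw [e]
  split <;> omega

/-- The signed value of `movzx eax, BYTE PTR [rbx+0x10]` for a small `submaps`. -/
theorem zext8_toInt_small (S : Nat) (h : S ≤ 16) : (BitVec.zeroExtend 32 (BitVec.ofNat 8 S)).toInt = (S : Int) := by
  have h1 : (BitVec.zeroExtend 32 (BitVec.ofNat 8 S)).toNat = S := by
    simp only [BitVec.toNat_setWidth, BitVec.toNat_ofNat, BitVec.zeroExtend]
    omega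
  rw [BitVec.toInt_eq_toNat_cond, h1]
  split <;> omega

/-- **The exit of the submap loop, `++i`** (0x116552 `add dword [R + 10H], 1`): the loop record of the mapping loop 4095 at the head
`pc_R8` with the counter `i + 1` and the PRESENT arena as the snapshot of the next iteration, over the ONE store of the exit arm (the
window `[R + 10H, R + 14H)` is the counter: not a `MapWin`, so `MapLoop.carry` does not apply). `Frame` by `Frame.carry_sec`, `Mid g 7 8
8` by `Mid.carry_spill` (the constants `[R + 8]`, `[R + 20H]`, `[R + 24H]` are off the window; Z10 is not read for `kc = 8`), MAPS(i + 1)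
by `R12.maps_succ` in the OLD memory and then record by record over the store (no byte of `*f` or of the arena's buffer is written). -/
theorem mapLoop_next {u₀ : State} {g : Ghost} {pc : Word} {i j : Nat} {A7 A7c Ai : Arena} {A : Arena × List Obj} {v w : State}
    (hl : MapLoop u₀ g pc i A7 A7c Ai A v) (hcur : MapCur g (Since Ai A.1) v.mem i 12)
    (hdone : ∀ s : Nat, s < j → Mapping.SubmapOK v.mem g.f (mapAt g v.mem i) s)
    (hexit : Mapping.submaps v.mem (mapAt g v.mem i) ≤ j)
    (hs : Mem.SameExcept [⟨g.R + 0x10, g.R + 0x14⟩] v.mem w.mem) (hun : ShadowUntouched v.mem w.mem)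
    (hcnt : StartDecoder.slot g w.mem 0x10 = i + 1)
    (hrip : w.rip = pc_R8) (hrsp : w.reg .rsp = addr g.R) (hcode : CodeOK u₀ w.mem) (hinv : abiInv w)
    (hrbp : w.reg .rbp = v.reg .rbp) : MapLoop u₀ g pc_R8 (i + 1) A7 A7c A.1 A w := by
  have hp : Pos g A := hl.secPt.pos
  have ha := hl.mid.arena
  obtain ⟨htab, hT1, hT2⟩ := hl.table
  have hlt := hcur.lt
  have h1 := hl.maps.MP1
  have p1 := hp.r_eq
  have p2 := hp.ra_lo
  have p3 := hp.ra_hi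
  have p4 := hp.f_lo
  have p5 := hp.f_hi
  have p6 := hp.f_stack
  have p7 := hp.objOut
  have p10 := hp.ar_hi
  have p11 := hp.ar_stack
  -- a region off the counter's slot reads the same
  have eqOff : ∀ lo hi : Nat, (hi ≤ g.R + 0x10 ∨ g.R + 0x14 ≤ lo) → Mem.EqOn lo hi v.mem w.mem := by
    intro lo hi q
    apply hs.eqOn
    intro x hx
    rw [List.mem_singleton.mp hx]
    simp only []
    omega
  -- the frame
  have hframe : Frame u₀ g pc_R8 A w := by
    apply hl.frame.carry_sec hp hs hun _ hrip hrsp hcode hinv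
    intro x hx
    rw [List.mem_singleton.mp hx]
    unfold SecWin
    right
    left
    simp only []
    omega
  -- the reader's fields
  have hbits : Bits (g.Blk A) g.len w.mem g.f := by
    apply bits_kept hp hl.mid.bits hs
    intro x hx
    rw [List.mem_singleton.mp hx]
    left
    simp only []
    omega
  -- the frame constants: the shadow index, ONE20, Z24 are off the counter's slot
  have hconsts : SDFrameConsts 8 w.mem g.R := by
    have hc := hl.mid.consts
    have eA : Mem.EqOn (g.R + 8) (g.R + 0x10) v.mem w.mem := eqOff _ _ (by omega)
    have eB : Mem.EqOn (g.R + 0x14) (g.R + 0x2c) v.mem w.mem := eqOff _ _ (by omega)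
    refine ⟨hc.aligned, ?_, ?_, ?_, ?_⟩
    · rw [eA.u64 _ (by omega) (by omega) (by omega)]
      exact hc.shadowIdx
    · rw [eB.u32 _ (by omega) (by omega) (by omega)]
      exact hc.one20
    · intro h7
      omega
    · intro h2 h11
      rw [eB.u32 _ (by omega) (by omega) (by omega)]
      exact hc.z24 h2 h11
  have hmid : Mid g 7 8 8 A7 A w.mem := by
    apply hl.mid.carry_spill hp hs hun _ hbits hconsts
    intro x hx
    rw [List.mem_singleton.mp hx]
    right
    simp only []
    omega
  -- the fields of `*f` the loop's clauses read
  have hobj : ObjEq [(4, 8), (176, 180), (320, 324), (464, 468), (472, 480)] v.mem g.f w.mem g.f := by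
    apply ObjEq.of_sameExcept hs
    · intro x hx
      simp only [List.mem_cons, List.mem_nil_iff, or_false] at hx
      rcases hx with rfl | rfl | rfl | rfl | rfl <;> simp only [] <;> omega
    · intro x hx y hy
      rw [List.mem_singleton.mp hy]
      simp only [List.mem_cons, List.mem_nil_iff, or_false] at hx
      rcases hx with rfl | rfl | rfl | rfl | rfl <;> simp only [] <;> omega
  have ecount : stb_vorbis.mapping_count w.mem g.f = stb_vorbis.mapping_count v.mem g.f := by
    simp only [vacc, voff]
    exact hobj.i32 464 (by decide)
  have etab : stb_vorbis.mapping w.mem g.f = stb_vorbis.mapping v.mem g.f := by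
    simp only [vacc, voff]
    exact hobj.u64 472 (by decide)
  have eat : ∀ k, stb_vorbis.mapping_at w.mem g.f k = stb_vorbis.mapping_at v.mem g.f k := by
    intro k
    unfold stb_vorbis.mapping_at
    rw [etab]
  -- MAPS(i + 1) in the old memory: record `i` is complete
  have hnext : MapTrans A7 A7c A.1 A.1 v.mem g.f (i + 1) := R12.maps_succ hl.maps hcur hdone hexit
  -- a block of the arena is kept: the counter's slot is on the stack
  have hkept : ∀ C : Block, A.1.Blk C → C.Kept v.mem w.mem := by
    intro C hC
    have hin := arena_inside ha hC
    apply Block.Kept.of_sameExcept hs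
    · intro x hx
      rw [List.mem_singleton.mp hx]
      simp only []
      omega
    · omega
  have htabA : A.1.Blk ⟨stb_vorbis.mapping v.mem g.f, 56 * (stb_vorbis.mapping_count v.mem g.f).toNat⟩ :=
    (htab.mono hl.maps.ext7c).mono hl.maps.exti
  have hmaps' : MapTrans A7 A7c A.1 A.1 w.mem g.f (i + 1) := by
    refine ⟨hnext.ext7, hnext.ext7c, hnext.exti, ?_, ?_, ?_, ?_⟩
    · rw [ecount]
      exact hnext.n_le
    · rw [ecount]
      exact hnext.MP1
    · rw [ecount, etab]
      exact hnext.MP1_block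
    · intro k hk
      rw [eat k]
      have hr := hnext.record k hk
      have ek : stb_vorbis.mapping_at v.mem g.f k = stb_vorbis.mapping v.mem g.f + 56 * k := rfl
      have hrecK : (Block.mk (stb_vorbis.mapping_at v.mem g.f k) Off.sizeof.Mapping).Kept v.mem w.mem := by
        apply Block.Kept.of_sameExcept hs
        · intro x hx
          rw [List.mem_singleton.mp hx, ek]
          simp only [voff]
          omega
        · rw [ek]
          simp only [voff]
          omega
      exact hr.frame (hobj.sub (by decide)) hrecK (hkept _ hr.MP2.1) hr.MP2
  exact
    { frame := hframe
      hand := hl.hand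
      mid := hmid
      rbp := hrbp.trans hl.rbp
      cnt := hcnt
      i_le := by
        rw [ecount]
        omega
      maps := hmaps' }

end Vorbis.Spec.start_decoder_R12a
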